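-- pv_equiv track=rewrite | github.com/Minerstove/Python | cs11/LongExamStudy/LongExam.py | divisible_by_at_least_one
-- ===== SOURCE A (Python) =====
-- def divisible_by_at_least_one(x, y, u, v):
--     for num in range(x, y+1):
--         if num % u == 0 and num % v == 0:
--             yield num
--         elif num % u == 0 and num % v != 0:
--             yield num
--         elif num % u != 0 and num % v == 0:
--             yield num
-- ===== SOURCE B (Python) =====
-- def divisible_by_at_least_one(x, y, u, v):
--     if x > y:
--         return
--     au, av = abs(u), abs(v)
--     a = -(-x // au) * au   # first multiple of au that is >= x
--     b = -(-x // av) * av   # first multiple of av that is >= x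
--     while min(a, b) <= y:
--         m = min(a, b)
--         yield m
--         if a == m:
--             a += au
--         if b == m:
--             b += av
-- ===== Notes on version B (the rewrite author's own statement) =====
-- stated objective: faster
-- what changed: Instead of scanning every integer in [x,y] and testing both remainders, B computes the first multiple of |u| and of |v| at or above x by ceiling division and merges the two ascending multiple streams, emitting the minimum and advancing whichever stream(s) produced it; intended as faster with speed-up factor ~min(|u|,|v|) (measured up to ~400x when |u|,|v| > 1, ~1x when |u| or |v| is 1, so a timing run reported it unconfirmed overall).
import Mathlib
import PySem

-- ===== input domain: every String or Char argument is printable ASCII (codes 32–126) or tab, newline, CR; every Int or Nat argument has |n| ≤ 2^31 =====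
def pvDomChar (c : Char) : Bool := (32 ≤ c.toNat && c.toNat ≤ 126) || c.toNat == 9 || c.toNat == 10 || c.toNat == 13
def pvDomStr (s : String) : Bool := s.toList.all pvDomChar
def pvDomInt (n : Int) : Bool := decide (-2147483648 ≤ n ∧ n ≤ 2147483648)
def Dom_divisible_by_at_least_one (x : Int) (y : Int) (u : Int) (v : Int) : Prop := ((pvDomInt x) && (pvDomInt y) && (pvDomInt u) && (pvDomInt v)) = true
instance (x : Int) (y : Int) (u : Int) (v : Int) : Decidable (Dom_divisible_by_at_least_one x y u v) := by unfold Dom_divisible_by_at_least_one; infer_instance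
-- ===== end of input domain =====

-- B replaces A's scan of every integer in [x,y] with a merge of the two ascending
-- streams of multiples of |u| and |v| (asymptotically fewer steps when |u|,|v| > 1).


-- ===== PORT A =====
-- 'for num in range(x, y+1): if … yield num' collected into a list.
def divisible_by_at_least_one (x : Int) (y : Int) (u : Int) (v : Int) : List Int :=
  (PySem.List.pyRange x (y + 1) 1).foldl (fun acc num =>
    if PySem.Int.mod num u = 0 ∧ PySem.Int.mod num v = 0 then acc ++ [num]
    else if PySem.Int.mod num u = 0 ∧ ¬ (PySem.Int.mod num v = 0) then acc ++ [num]
    else if ¬ (PySem.Int.mod num u = 0) ∧ PySem.Int.mod num v = 0 then acc ++ [num]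
    else acc) []

-- ===== PORT B =====
-- B's while-loop: yield min(a,b), advance the stream(s) that produced it.
-- fuel is only a totality guard; (y+1-x).toNat iterations always suffice (each
-- iteration strictly increases min(a,b), which starts ≥ x, by at least 1 when |u|,|v| ≥ 1).
def pvMerge (y au av : Int) : Int → Int → Nat → List Int
  | _, _, 0 => []
  | a, b, f + 1 =>
    if min a b ≤ y then
      min a b :: pvMerge y au av (if a = min a b then a + au else a)
                                 (if b = min a b then b + av else b) f
    else []

def divisible_by_at_least_one_alt (x : Int) (y : Int) (u : Int) (v : Int) : List Int :=
  if x > y then []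
  else
    let au := |u|
    let av := |v|
    let a := -(PySem.Int.floordiv (-x) au) * au   -- first multiple of au ≥ x
    let b := -(PySem.Int.floordiv (-x) av) * av   -- first multiple of av ≥ x
    pvMerge y au av a b (y + 1 - x).toNat

-- ===== PRECONDITION & SPEC =====
-- A raises ZeroDivisionError exactly when the range is nonempty and u = 0 or v = 0
-- (with x > y the loop body never runs, so A returns [] even for zero divisors).
def Pre_divisible_by_at_least_one (x : Int) (y : Int) (u : Int) (v : Int) : Prop :=
  x ≤ y → (u ≠ 0 ∧ v ≠ 0)
instance (x : Int) (y : Int) (u : Int) (v : Int) : Decidable (Pre_divisible_by_at_least_one x y u v) := by unfold Pre_divisible_by_at_least_one; infer_instance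

def pvWitness_divisible_by_at_least_one : Int × Int × Int × Int := (1, 10, 2, 3)

def Spec_divisible_by_at_least_one (x : Int) (y : Int) (u : Int) (v : Int) (out : List Int) : Prop := out = divisible_by_at_least_one_alt x y u v
instance (x : Int) (y : Int) (u : Int) (v : Int) (out : List Int) : Decidable (Spec_divisible_by_at_least_one x y u v out) := by unfold Spec_divisible_by_at_least_one; infer_instance

-- ===== CLAIM (what is proved, stated in full; the proofs are below) =====
def Claim_equal_divisible_by_at_least_one : Prop := ∀ (x : Int) (y : Int) (u : Int) (v : Int), Dom_divisible_by_at_least_one x y u v → Pre_divisible_by_at_least_one x y u v → Spec_divisible_by_at_least_one x y u v (divisible_by_at_least_one x y u v)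

-- ===== LEMMAS AND PROOFS =====

-- A is the filter of the range by "u ∣ n ∨ v ∣ n".
lemma portA_eq_filter (x y u v : Int) :
    divisible_by_at_least_one x y u v
      = (PySem.List.pyRange x (y + 1) 1).filter (fun n => decide (u ∣ n ∨ v ∣ n)) := by
  unfold divisible_by_at_least_one
  have h : (fun (acc : List Int) (num : Int) =>
      if PySem.Int.mod num u = 0 ∧ PySem.Int.mod num v = 0 then acc ++ [num]
      else if PySem.Int.mod num u = 0 ∧ ¬ (PySem.Int.mod num v = 0) then acc ++ [num]
      else if ¬ (PySem.Int.mod num u = 0) ∧ PySem.Int.mod num v = 0 then acc ++ [num]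
      else acc)
      = (fun acc num => if u ∣ num ∨ v ∣ num then acc ++ [num] else acc) := by
    funext acc num
    by_cases h1 : u ∣ num <;> by_cases h2 : v ∣ num <;>
      simp [PySem.Int.mod_eq_zero_iff_dvd, h1, h2]
  rw [h, PySem.List.foldl_append_ite_eq_filter]
  simp

-- Skipping a prefix of the range that contains no element of the filter.
lemma filter_skip (y : Int) (p : Int → Prop) [DecidablePred p] :
    ∀ (k : Nat) (t t' : Int), t ≤ t' → (t' - t).toNat ≤ k →
    (∀ n, t ≤ n → n < t' → ¬ p n) →
    (PySem.List.pyRange t (y + 1) 1).filter (fun n => decide (p n))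
      = (PySem.List.pyRange t' (y + 1) 1).filter (fun n => decide (p n)) := by
  intro k
  induction k with
  | zero =>
    intro t t' h1 h2 h3
    have : t' = t := by omega
    subst this; rfl
  | succ k ih =>
    intro t t' h1 h2 h3
    by_cases he : t = t'
    · subst he; rfl
    · have ht : t < t' := lt_of_le_of_ne h1 he
      by_cases hy : t ≤ y
      · rw [PySem.List.pyRange_one_cons (by omega : t < y + 1), List.filter_cons]
        have hpt : ¬ p t := h3 t le_rfl ht
        simp only [hpt, decide_false, Bool.false_eq_true, if_false]
        exact ih (t + 1) t' (by omega) (by omega) (fun n hn hn' => h3 n (by omega) hn')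
      · rw [PySem.List.pyRange_one_eq_nil (by omega : y + 1 ≤ t),
            PySem.List.pyRange_one_eq_nil (by omega : y + 1 ≤ t')]

-- The merge loop produces exactly the filter of the remaining range.
lemma merge_eq_filter (y au av : Int) (hau : 0 < au) (hav : 0 < av) :
    ∀ (fuel : Nat) (t a b : Int),
    au ∣ a → av ∣ b → t ≤ a → t ≤ b →
    (∀ n, t ≤ n → au ∣ n → a ≤ n) → (∀ n, t ≤ n → av ∣ n → b ≤ n) →
    (y + 1 - t).toNat ≤ fuel →
    pvMerge y au av a b fuel
      = (PySem.List.pyRange t (y + 1) 1).filter (fun n => decide (au ∣ n ∨ av ∣ n)) := by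
  intro fuel
  induction fuel with
  | zero =>
    intro t a b _ _ _ _ _ _ hf
    rw [PySem.List.pyRange_one_eq_nil (by omega : y + 1 ≤ t)]
    rfl
  | succ f ih =>
    intro t a b ha1 hb1 ha2 hb2 ha3 hb3 hf
    have htm : t ≤ min a b := le_min ha2 hb2
    by_cases hm : min a b ≤ y
    · have hnone : ∀ n, t ≤ n → n < min a b → ¬ (au ∣ n ∨ av ∣ n) := by
        intro n hn hn' h
        rcases h with h | h
        · exact absurd (ha3 n hn h) (by omega)
        · exact absurd (hb3 n hn h) (by omega)
      rw [filter_skip y (fun n => au ∣ n ∨ av ∣ n) (min a b - t).toNat t (min a b)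
            htm le_rfl hnone,
          PySem.List.pyRange_one_cons (by omega : min a b < y + 1), List.filter_cons]
      have hpm : au ∣ min a b ∨ av ∣ min a b := by
        rcases le_total a b with h | h
        · left; rwa [min_eq_left h]
        · right; rwa [min_eq_right h]
      simp only [pvMerge, hm, hpm, decide_true, if_pos]
      congr 1
      apply ih (min a b + 1)
      · split
        · exact Dvd.dvd.add ha1 dvd_rfl
        · exact ha1
      · split
        · exact Dvd.dvd.add hb1 dvd_rfl
        · exact hb1
      · split
        · next h => omega
        · next h =>
          have : min a b ≤ a := min_le_left a b
          omega
      · split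
        · next h => omega
        · next h =>
          have : min a b ≤ b := min_le_right a b
          omega
      · intro n hn hd
        have hna : a ≤ n := ha3 n (by omega) hd
        split
        · next h =>
          have hdiff : au ∣ n - a := (Int.dvd_sub hd ha1)
          have : au ≤ n - a := Int.le_of_dvd (by omega) hdiff
          omega
        · next h => omega
      · intro n hn hd
        have hnb : b ≤ n := hb3 n (by omega) hd
        split
        · next h =>
          have hdiff : av ∣ n - b := (Int.dvd_sub hd hb1)
          have : av ≤ n - b := Int.le_of_dvd (by omega) hdiff
          omega
        · next h => omega
      · omega
    · simp only [pvMerge, hm, if_false]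
      by_cases hty : t ≤ y + 1
      · rw [filter_skip y (fun n => au ∣ n ∨ av ∣ n) (y + 1 - t).toNat t (y + 1)
              hty le_rfl ?_, PySem.List.pyRange_one_eq_nil le_rfl]
        · rfl
        · intro n hn hn' h
          rcases h with h | h
          · have := ha3 n hn h
            have := min_le_left a b
            omega
          · have := hb3 n hn h
            have := min_le_right a b
            omega
      · rw [PySem.List.pyRange_one_eq_nil (by omega : y + 1 ≤ t)]
        rfl

-- -(-x // d) * d is the least multiple of d that is ≥ x (d > 0).
lemma ceil_mult (x d : Int) (hd : 0 < d) :
    d ∣ (-(PySem.Int.floordiv (-x) d) * d) ∧ x ≤ -(PySem.Int.floordiv (-x) d) * d ∧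
    (∀ n, x ≤ n → d ∣ n → -(PySem.Int.floordiv (-x) d) * d ≤ n) := by
  have hq := (PySem.Int.neg_floordiv_neg_eq_iff_of_pos (a := x)
      (q := -PySem.Int.floordiv (-x) d) hd).mp rfl
  refine ⟨dvd_mul_left d _, hq.2, ?_⟩
  intro n hn hdn
  obtain ⟨k, hk⟩ := hdn
  have h1 : (-PySem.Int.floordiv (-x) d - 1) * d < d * k := by
    rw [← hk]; exact lt_of_lt_of_le hq.1 hn
  have h2 : -PySem.Int.floordiv (-x) d - 1 < k := by nlinarith
  have h3 : -PySem.Int.floordiv (-x) d ≤ k := by omega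
  calc -PySem.Int.floordiv (-x) d * d ≤ k * d := by nlinarith
    _ = n := by rw [hk]; ring

-- ===== VERDICT (by name: the statement is the Claim_ definition above) =====
theorem divisible_by_at_least_one_spec : Claim_equal_divisible_by_at_least_one := by
  intro x y u v _hdom hpre
  unfold Spec_divisible_by_at_least_one
  rw [portA_eq_filter]
  unfold divisible_by_at_least_one_alt
  by_cases hxy : x > y
  · rw [if_pos hxy, PySem.List.pyRange_one_eq_nil (by omega)]
    rfl
  · obtain ⟨hu, hv⟩ := hpre (by omega)
    have hau : 0 < |u| := abs_pos.mpr hu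
    have hav : 0 < |v| := abs_pos.mpr hv
    rw [if_neg hxy]
    obtain ⟨hda, hxa, hmina⟩ := ceil_mult x |u| hau
    obtain ⟨hdb, hxb, hminb⟩ := ceil_mult x |v| hav
    rw [merge_eq_filter y |u| |v| hau hav ((y + 1 - x).toNat) x _ _
          hda hdb hxa hxb hmina hminb le_rfl]
    exact List.filter_congr (fun n _ => by simp [abs_dvd])
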